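-- pv_equiv track=rewrite | github.com/SomeStein/maskmatch | maskmatch/utils.py | _precombine_groups
-- ===== SOURCE A (Python) =====
-- def _backtrack_multiplicity(
--     group_masks, masks, multiplicity, current_indices, current_mask=0, start_idx=0
-- ):
--     """
--     Enumerate all combinations of 'multiplicity' masks from 'masks' list
--     such that no two masks overlap (bitwise AND == 0), and append the
--     combined mask to 'group_masks'.
--
--     Parameters:
--     - group_masks: list[int], accumulates the combined masks of valid tuples
--     - masks: list[int], the candidate masks to combine
--     - multiplicity: int, number of masks to select
--     - current_indices: list[int], indices of masks chosen so far (for recursion)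
--     - current_mask: int, OR of currently chosen masks
--     - start_idx: int, index in masks to start searching (to avoid duplicates)
--     """
--
--     # Base case: desired multiplicity reached
--     if len(current_indices) == multiplicity:
--         group_masks.append(current_mask)
--         return
--
--     # Iterate over remaining masks
--     for idx in range(start_idx, len(masks)):
--         mask = masks[idx]
--         # Only choose if disjoint with current selection
--         if (current_mask & mask) == 0:
--             # Recursive call, increment start_idx to prevent duplicates
--             _backtrack_multiplicity(
--                 group_masks,
--                 masks,
--                 multiplicity,
--                 current_indices + [idx],
--                 current_mask | mask,
--                 idx + 1,
--             )
--
-- def _precombine_groups(groups):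
--     result = []
--     for masks, multiplicity in groups:
--
--         group_masks = []
--         current_indeces = []
--
--         _backtrack_multiplicity(group_masks, masks, multiplicity, current_indeces)
--
--         result.append((group_masks, multiplicity))
--
--     return result
-- ===== SOURCE B (Python) =====
-- def _combine_disjoint(masks, multiplicity):
--     # C(k) = OR-values of pairwise-disjoint k-subsets of the processed suffix,
--     # built back-to-front; index-lexicographic order falls out of the DP.
--     if multiplicity < 0 or multiplicity > len(masks):
--         return []
--     rows = [[0]] + [[] for _ in range(multiplicity)]
--     for mask in reversed(masks):
--         rows = [[0]] + [
--             [mask | s for s in prev if mask & s == 0] + cur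
--             for prev, cur in zip(rows, rows[1:])
--         ]
--     return rows[multiplicity]
--
--
-- def _precombine_groups(groups):
--     return [(_combine_disjoint(masks, multiplicity), multiplicity)
--             for masks, multiplicity in groups]
-- ===== Notes on version B (the rewrite author's own statement) =====
-- stated objective: alternative
-- what changed: Replaces the recursive pruned backtracking over index tuples with an iterative back-to-front dynamic-programming table rows[k] (OR-values of pairwise-disjoint k-subsets of the processed suffix), which shares subproblem rows across combinations instead of re-walking the recursion tree.
import Mathlib
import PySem

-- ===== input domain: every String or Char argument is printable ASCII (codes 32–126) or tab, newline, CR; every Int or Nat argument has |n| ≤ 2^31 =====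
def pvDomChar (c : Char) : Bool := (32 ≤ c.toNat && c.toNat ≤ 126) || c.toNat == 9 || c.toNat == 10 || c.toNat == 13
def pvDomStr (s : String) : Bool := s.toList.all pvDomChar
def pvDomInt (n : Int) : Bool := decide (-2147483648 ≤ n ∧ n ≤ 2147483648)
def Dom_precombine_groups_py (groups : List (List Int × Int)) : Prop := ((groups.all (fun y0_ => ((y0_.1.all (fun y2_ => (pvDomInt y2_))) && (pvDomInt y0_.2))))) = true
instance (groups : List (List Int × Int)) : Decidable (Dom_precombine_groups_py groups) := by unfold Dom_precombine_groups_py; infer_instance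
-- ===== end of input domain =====

-- B replaces A's recursive backtracking with an iterative back-to-front DP over the mask list; same return value (no argument is mutated by either).

-- ===== PORT A =====
-- literal port of _backtrack_multiplicity (the recursion and its for-loop), result list returned instead of mutated
mutual
def pvBacktrack (masks : List Int) (multiplicity : Int) (currentIndices : List Int)
    (currentMask : Int) (startIdx : Nat) : List Int :=
  if (currentIndices.length : Int) = multiplicity then [currentMask]
  else pvBtLoop masks multiplicity currentIndices currentMask startIdx
termination_by (masks.length + 1 - startIdx, 1)

def pvBtLoop (masks : List Int) (multiplicity : Int) (currentIndices : List Int)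
    (currentMask : Int) (idx : Nat) : List Int :=
  if h : idx < masks.length then
    let mask := masks[idx]
    (if Int.land currentMask mask = 0 then
        pvBacktrack masks multiplicity (currentIndices ++ [(idx : Int)]) (Int.lor currentMask mask) (idx + 1)
      else []) ++ pvBtLoop masks multiplicity currentIndices currentMask (idx + 1)
  else []
termination_by (masks.length + 1 - idx, 0)
decreasing_by
  · apply Prod.Lex.left; omega
  · apply Prod.Lex.left; omega
end

def precombine_groups_py (groups : List (List Int × Int)) : List (List Int × Int) :=
  groups.foldl (fun result g =>
    let groupMasks := pvBacktrack g.1 g.2 [] 0 0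
    result ++ [(groupMasks, g.2)]) []

-- ===== PORT B =====
-- one pass of B's inner list comprehension: rows' = [[0]] + [new-row for prev,cur in zip(rows, rows[1:])]
def pvStep (mask : Int) (rows : List (List Int)) : List (List Int) :=
  [(0 : Int)] :: (rows.zip (rows.drop 1)).map (fun pc =>
    ((pc.1.filter (fun s => Int.land mask s == 0)).map (fun s => Int.lor mask s)) ++ pc.2)

def pvCombineDisjoint (masks : List Int) (multiplicity : Int) : List Int :=
  if multiplicity < 0 ∨ multiplicity > (masks.length : Int) then []
  else
    let init : List (List Int) := [(0 : Int)] :: List.replicate multiplicity.toNat []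
    let rows := masks.reverse.foldl (fun rows mask => pvStep mask rows) init
    rows.getD multiplicity.toNat []

def precombine_groups_py_alt (groups : List (List Int × Int)) : List (List Int × Int) :=
  groups.map (fun g => (pvCombineDisjoint g.1 g.2, g.2))

-- ===== PRECONDITION & SPEC =====
def Spec_precombine_groups_py (groups : List (List Int × Int)) (out : List (List Int × Int)) : Prop := out = precombine_groups_py_alt groups
instance (groups : List (List Int × Int)) (out : List (List Int × Int)) : Decidable (Spec_precombine_groups_py groups out) := by unfold Spec_precombine_groups_py; infer_instance

-- ===== CLAIM (what is proved, stated in full; the proofs are below) =====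
def Claim_equal_precombine_groups_py : Prop := ∀ (groups : List (List Int × Int)), Dom_precombine_groups_py groups → Spec_precombine_groups_py groups (precombine_groups_py groups)

-- ===== LEMMAS AND PROOFS =====

-- bitwise toolkit: extensionality via Int.testBit, then the zero/assoc/distrib identities
theorem pvTestBit_zero (k : Nat) : (0 : Int).testBit k = false := by
  show Nat.testBit 0 k = false; simp

theorem pvTestBit_ext (a b : Int) (h : ∀ k, a.testBit k = b.testBit k) : a = b := by
  cases a with
  | ofNat m =>
    cases b with
    | ofNat n => exact congrArg Int.ofNat (Nat.eq_of_testBit_eq h)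
    | negSucc n =>
      exfalso
      have hm : m.testBit (m + n) = false :=
        Nat.testBit_lt_two_pow (lt_of_lt_of_le Nat.lt_two_pow_self (Nat.pow_le_pow_right (by norm_num) (by omega)))
      have hn : n.testBit (m + n) = false :=
        Nat.testBit_lt_two_pow (lt_of_lt_of_le Nat.lt_two_pow_self (Nat.pow_le_pow_right (by norm_num) (by omega)))
      have := h (m + n)
      simp only [Int.testBit, hm, hn] at this
      exact absurd this (by simp)
  | negSucc m =>
    cases b with
    | ofNat n =>
      exfalso
      have hm : m.testBit (m + n) = false :=
        Nat.testBit_lt_two_pow (lt_of_lt_of_le Nat.lt_two_pow_self (Nat.pow_le_pow_right (by norm_num) (by omega)))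
      have hn : n.testBit (m + n) = false :=
        Nat.testBit_lt_two_pow (lt_of_lt_of_le Nat.lt_two_pow_self (Nat.pow_le_pow_right (by norm_num) (by omega)))
      have := h (m + n)
      simp only [Int.testBit, hm, hn] at this
      exact absurd this (by simp)
    | negSucc n =>
      refine congrArg Int.negSucc (Nat.eq_of_testBit_eq fun k => ?_)
      have := h k
      simp only [Int.testBit] at this
      exact Bool.not_inj this

theorem pv_land_zero_left (a : Int) : Int.land 0 a = 0 :=
  pvTestBit_ext _ _ (fun k => by simp [Int.testBit_land, pvTestBit_zero])
theorem pv_land_zero_right (a : Int) : Int.land a 0 = 0 :=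
  pvTestBit_ext _ _ (fun k => by simp [Int.testBit_land, pvTestBit_zero])
theorem pv_lor_zero_left (a : Int) : Int.lor 0 a = a :=
  pvTestBit_ext _ _ (fun k => by simp [Int.testBit_lor, pvTestBit_zero])
theorem pv_lor_zero_right (a : Int) : Int.lor a 0 = a :=
  pvTestBit_ext _ _ (fun k => by simp [Int.testBit_lor, pvTestBit_zero])
theorem pv_lor_assoc (a b c : Int) : Int.lor (Int.lor a b) c = Int.lor a (Int.lor b c) :=
  pvTestBit_ext _ _ (fun k => by simp [Int.testBit_lor, Bool.or_assoc])
theorem pv_land_lor_left (a b c : Int) : Int.land a (Int.lor b c) = Int.lor (Int.land a b) (Int.land a c) :=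
  pvTestBit_ext _ _ (fun k => by simp [Int.testBit_lor, Int.testBit_land, Bool.and_or_distrib_left])
theorem pv_land_lor_right (a b c : Int) : Int.land (Int.lor a b) c = Int.lor (Int.land a c) (Int.land b c) :=
  pvTestBit_ext _ _ (fun k => by simp [Int.testBit_lor, Int.testBit_land, Bool.and_or_distrib_right])
theorem pv_lor_eq_zero_iff (a b : Int) : Int.lor a b = 0 ↔ a = 0 ∧ b = 0 := by
  constructor
  · intro h
    constructor
    · refine pvTestBit_ext _ _ (fun k => ?_)
      have := congrArg (fun x => Int.testBit x k) h
      simp only [Int.testBit_lor, pvTestBit_zero] at this ⊢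
      exact (Bool.or_eq_false_iff.mp this).1
    · refine pvTestBit_ext _ _ (fun k => ?_)
      have := congrArg (fun x => Int.testBit x k) h
      simp only [Int.testBit_lor, pvTestBit_zero] at this ⊢
      exact (Bool.or_eq_false_iff.mp this).2
  · rintro ⟨rfl, rfl⟩
    exact pv_lor_zero_left 0

-- reference recursion: ORs of all pairwise-disjoint k-selections from xs (lex order), cur accumulated
def pvRspec (xs : List Int) (k : Int) (cur : Int) : List Int :=
  if k = 0 then [cur]
  else
    match xs with
    | [] => []
    | x :: rest =>
        (if Int.land cur x = 0 then pvRspec rest (k - 1) (Int.lor cur x) else []) ++ pvRspec rest k cur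

theorem pvRspec_neg (xs : List Int) : ∀ (k cur : Int), k < 0 → pvRspec xs k cur = [] := by
  induction xs with
  | nil => intro k cur h; rw [pvRspec]; simp [show k ≠ 0 by omega]
  | cons x rest ih =>
    intro k cur h
    rw [pvRspec]
    simp only [show k ≠ 0 by omega, if_false]
    rw [ih (k - 1) _ (by omega), ih k _ h]
    simp


-- A's backtracking computes pvRspec on the suffix
theorem pvBacktrack_eq_Rspec : ∀ (n : Nat) (masks : List Int) (mult : Int) (cur : List Int)
    (curMask : Int) (idx : Nat), masks.length ≤ idx + n →
    pvBacktrack masks mult cur curMask idx = pvRspec (masks.drop idx) (mult - cur.length) curMask := by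
  intro n
  induction n with
  | zero =>
    intro masks mult cur curMask idx hn
    rw [pvBacktrack]
    by_cases hb : (cur.length : Int) = mult
    · rw [if_pos hb, pvRspec.eq_def]; simp [show mult - (cur.length : Int) = 0 by omega]
    · rw [if_neg hb, pvBtLoop, dif_neg (by omega), List.drop_of_length_le (by omega), pvRspec.eq_def]
      simp [show mult - (cur.length : Int) ≠ 0 by omega]
  | succ n ih =>
    intro masks mult cur curMask idx hn
    rw [pvBacktrack]
    by_cases hb : (cur.length : Int) = mult
    · rw [if_pos hb, pvRspec.eq_def]; simp [show mult - (cur.length : Int) = 0 by omega]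
    · rw [if_neg hb, pvBtLoop]
      by_cases h : idx < masks.length
      · rw [dif_pos h, List.drop_eq_getElem_cons h, pvRspec]
        simp only [show mult - (cur.length : Int) ≠ 0 by omega, if_false]
        have h2 : pvBtLoop masks mult cur curMask (idx + 1) = pvBacktrack masks mult cur curMask (idx + 1) := by
          rw [pvBacktrack, if_neg hb]
        rw [h2, ih masks mult cur curMask (idx + 1) (by omega)]
        by_cases hd : Int.land curMask masks[idx] = 0
        · rw [if_pos hd, if_pos hd, ih masks mult (cur ++ [(idx : Int)]) _ (idx + 1) (by omega)]
          congr 1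
          congr 1
          simp only [List.length_append, List.length_cons, List.length_nil]
          push_cast
          ring
        · rw [if_neg hd, if_neg hd]
      · rw [dif_neg h, List.drop_of_length_le (by omega), pvRspec.eq_def]
        simp [show mult - (cur.length : Int) ≠ 0 by omega]

-- key bridge: accumulating cur = filtering/mapping the cur=0 run
theorem pvRspec_cur (xs : List Int) : ∀ (k cur : Int),
    pvRspec xs k cur = (pvRspec xs k 0).filterMap
      (fun s => if Int.land cur s = 0 then some (Int.lor cur s) else none) := by
  induction xs with
  | nil =>
    intro k cur
    by_cases hk : k = 0
    · subst hk
      rw [pvRspec.eq_def, pvRspec.eq_def]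
      simp [pv_land_zero_right, pv_lor_zero_right]
    · rw [pvRspec.eq_def, pvRspec.eq_def]
      simp [hk]
  | cons x rest ih =>
    intro k cur
    by_cases hk : k = 0
    · subst hk
      rw [pvRspec.eq_def, pvRspec.eq_def]
      simp [pv_land_zero_right, pv_lor_zero_right]
    · rw [pvRspec, pvRspec]
      simp only [hk, if_false]
      rw [if_pos (pv_land_zero_left x), pv_lor_zero_left, List.filterMap_append]
      congr 1
      · rw [ih (k - 1) x, List.filterMap_filterMap]
        by_cases hcx : Int.land cur x = 0
        · rw [if_pos hcx, ih (k - 1) (Int.lor cur x)]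
          apply List.filterMap_congr
          intro s _
          by_cases hxs : Int.land x s = 0
          · have hcond : Int.land (Int.lor cur x) s = Int.land cur s := by
              rw [pv_land_lor_right, hxs, pv_lor_zero_right]
            have hcond2 : Int.land cur (Int.lor x s) = Int.land cur s := by
              rw [pv_land_lor_left, hcx, pv_lor_zero_left]
            simp [hxs, hcond, hcond2, pv_lor_assoc]
          · have hcond : Int.land (Int.lor cur x) s ≠ 0 := by
              rw [pv_land_lor_right]
              intro h
              exact hxs ((pv_lor_eq_zero_iff _ _).mp h).2
            simp [hxs, hcond]
        · rw [if_neg hcx]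
          symm
          rw [List.filterMap_eq_nil_iff]
          intro s _
          by_cases hxs : Int.land x s = 0
          · have hcond : Int.land cur (Int.lor x s) ≠ 0 := by
              rw [pv_land_lor_left]
              intro h
              exact hcx ((pv_lor_eq_zero_iff _ _).mp h).1
            simp [hxs, hcond]
          · simp [hxs]
      · exact ih k cur

theorem pv_filter_map_eq_filterMap (l : List Int) (m : Int) :
    (l.filter (fun s => Int.land m s == 0)).map (fun s => Int.lor m s)
      = l.filterMap (fun s => if Int.land m s = 0 then some (Int.lor m s) else none) := by
  induction l with
  | nil => rfl
  | cons x rest ih =>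
    by_cases h : Int.land m x = 0
    · simp [h, ih]
    · simp [h, ih]

theorem pv_zip_tail_map_range {α : Type} : ∀ (n : Nat) (f : Nat → α),
    (((List.range (n + 1)).map f).zip (((List.range (n + 1)).map f).drop 1))
      = (List.range n).map (fun k => (f k, f (k + 1))) := by
  intro n f
  apply List.ext_getElem
  · simp
  · intro i h1 h2
    simp only [List.getElem_zip, List.getElem_drop, List.getElem_map, List.getElem_range]
    have : 1 + i = i + 1 := by omega
    rw [this]

theorem pvStep_rowsSpec (xs : List Int) (mask : Int) (m : Nat) :
    pvStep mask ((List.range (m + 1)).map (fun k : Nat => pvRspec xs (k : Int) 0))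
      = (List.range (m + 1)).map (fun k : Nat => pvRspec (mask :: xs) (k : Int) 0) := by
  unfold pvStep
  rw [pv_zip_tail_map_range, List.map_map]
  conv_rhs => rw [List.range_succ_eq_map, List.map_cons, List.map_map]
  congr 1
  apply List.map_congr_left
  intro k _
  simp only [Function.comp_apply]
  rw [pvRspec]
  have hk : ((Nat.succ k : Nat) : Int) ≠ 0 := by omega
  simp only [Nat.succ_eq_add_one, hk, if_false]
  rw [if_pos (pv_land_zero_left mask), pv_lor_zero_left]
  congr 1
  rw [pv_filter_map_eq_filterMap, ← pvRspec_cur]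
  congr 1
  push_cast
  ring

theorem pvRows_spec (m : Nat) : ∀ (xs : List Int),
    xs.foldr pvStep ([(0 : Int)] :: List.replicate m [])
      = (List.range (m + 1)).map (fun k : Nat => pvRspec xs (k : Int) 0) := by
  intro xs
  induction xs with
  | nil =>
    rw [List.foldr_nil, List.range_succ_eq_map, List.map_cons, List.map_map]
    congr 1
    symm
    rw [List.eq_replicate_iff]
    refine ⟨by simp, ?_⟩
    intro b hb
    simp only [List.mem_map, Function.comp_apply] at hb
    obtain ⟨k, _, hk⟩ := hb
    rw [← hk, pvRspec.eq_def]
    simp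
    omega
  | cons x rest ih =>
    rw [List.foldr_cons, ih, pvStep_rowsSpec]

theorem pvRspec_big (xs : List Int) : ∀ (k cur : Int), (xs.length : Int) < k → pvRspec xs k cur = [] := by
  induction xs with
  | nil => intro k cur h; rw [pvRspec.eq_def]; simp [show k ≠ 0 by simp at h; omega]
  | cons x rest ih =>
    intro k cur h
    simp only [List.length_cons] at h
    rw [pvRspec]
    simp only [show k ≠ 0 by push_cast at h; omega, if_false]
    rw [ih (k - 1) _ (by push_cast at h ⊢; omega), ih k _ (by push_cast at h ⊢; omega)]
    simp

theorem pvCombineDisjoint_eq (masks : List Int) (mult : Int) :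
    pvCombineDisjoint masks mult = pvBacktrack masks mult [] 0 0 := by
  have hbt : pvBacktrack masks mult [] 0 0 = pvRspec masks mult 0 := by
    rw [pvBacktrack_eq_Rspec masks.length masks mult [] 0 0 (by omega)]
    simp
  rw [hbt]
  unfold pvCombineDisjoint
  by_cases h : mult < 0 ∨ mult > (masks.length : Int)
  · rw [if_pos h]
    rcases h with h | h
    · rw [pvRspec_neg masks mult 0 h]
    · rw [pvRspec_big masks mult 0 h]
  · rw [if_neg h]
    push Not at h
    have hf : masks.reverse.foldl (fun rows mask => pvStep mask rows)
        ([(0 : Int)] :: List.replicate mult.toNat [])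
        = masks.foldr pvStep ([(0 : Int)] :: List.replicate mult.toNat []) := by
      rw [List.foldl_reverse]
    simp only [hf, pvRows_spec]
    rw [List.getD_eq_getElem?_getD]
    simp only [List.getElem?_map, List.getElem?_range (by omega : mult.toNat < mult.toNat + 1)]
    simp [Int.toNat_of_nonneg (by omega : (0 : Int) ≤ mult)]


theorem pv_foldl_append {α β : Type} (h : α → β) : ∀ (l : List α) (acc : List β),
    l.foldl (fun r g => r ++ [h g]) acc = acc ++ l.map h := by
  intro l
  induction l with
  | nil => intro acc; simp
  | cons x rest ih => intro acc; rw [List.foldl_cons, ih, List.map_cons]; simp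

-- ===== VERDICT (by name: the statement is the Claim_ definition above) =====
theorem precombine_groups_py_spec : Claim_equal_precombine_groups_py := by
  intro groups _
  unfold Spec_precombine_groups_py precombine_groups_py precombine_groups_py_alt
  rw [pv_foldl_append (fun g => (pvBacktrack g.1 g.2 [] 0 0, g.2)) groups []]
  rw [List.nil_append]
  apply List.map_congr_left
  intro g _
  rw [pvCombineDisjoint_eq]
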